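-- pv_equiv track=rewrite | github.com/EliFrun/my-leetcode-submissions | submissions/3928-split-and-merge-array-transformation/solution.py | minSplitMerge
-- ===== SOURCE A (Python) =====
-- from typing import List
--
-- def minSplitMerge(nums1: List[int], nums2: List[int]) -> int:
--     seen = set()
--     curr = set([tuple(nums1)])
--     nums2 = tuple(nums2)
--     cnt = -1
--     while curr:
--         cnt += 1
--         nxt = set()
--         for lis in curr:
--             if lis in seen:
--                 continue
--             seen.add(lis)
--             if lis == nums2:
--                 return cnt
--             for i in range(len(nums1)):
--                 for j in range(i + 1, len(nums1) + 1):
--                     new_lis = lis[:i] + lis[j:]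
--                     for k in range(len(new_lis)):
--                         tmp = tuple(new_lis[:k] + lis[i:j] + new_lis[k:])
--                         nxt.add(tmp)
--
--             curr = nxt - seen
--     return -1
-- ===== SOURCE B (Python) =====
-- def minSplitMerge(nums1, nums2):
--     n = len(nums1)
--     start = tuple(nums1)
--     target = tuple(nums2)
--     verts = arrangements(list(nums1))
--     V = len(verts)
--     dist = {v: V for v in verts}
--     dist[start] = 0
--     while True:
--         new = dict(dist)
--         for u in verts:
--             du = dist[u]
--             for nb in moves(n, u):
--                 if du + 1 < new.get(nb, V):
--                     new[nb] = du + 1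
--         if new == dist:
--             break
--         dist = new
--     d = dist.get(target, V)
--     return d if d < V else -1
--
--
-- def arrangements(items):
--     """All distinct orderings of items (first-occurrence recursion)."""
--     if not items:
--         return [()]
--     out = []
--     used = set()
--     for idx in range(len(items)):
--         x = items[idx]
--         if x in used:
--             continue
--         used.add(x)
--         rest = items[:idx] + items[idx + 1:]
--         for t in arrangements(rest):
--             out.append((x,) + t)
--     return out
--
--
-- def moves(n, lis):
--     """All results of removing a subsegment and reinserting it."""
--     out = []
--     for i in range(n):
--         for j in range(i + 1, n + 1):
--             rest = lis[:i] + lis[j:]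
--             seg = lis[i:j]
--             for k in range(len(rest)):
--                 out.append(rest[:k] + seg + rest[k:])
--     return out
-- ===== Notes on version B (the rewrite author's own statement) =====
-- stated objective: alternative
-- what changed: Replaces A's frontier BFS over implicitly discovered states by a global dynamic program: B first enumerates the whole state graph (all distinct arrangements of nums1, generated by a first-occurrence recursion), then runs synchronous Bellman-Ford-style relaxation rounds over all vertices until the distance table reaches a fixpoint, and finally reads off the target's distance.
import Mathlib
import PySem

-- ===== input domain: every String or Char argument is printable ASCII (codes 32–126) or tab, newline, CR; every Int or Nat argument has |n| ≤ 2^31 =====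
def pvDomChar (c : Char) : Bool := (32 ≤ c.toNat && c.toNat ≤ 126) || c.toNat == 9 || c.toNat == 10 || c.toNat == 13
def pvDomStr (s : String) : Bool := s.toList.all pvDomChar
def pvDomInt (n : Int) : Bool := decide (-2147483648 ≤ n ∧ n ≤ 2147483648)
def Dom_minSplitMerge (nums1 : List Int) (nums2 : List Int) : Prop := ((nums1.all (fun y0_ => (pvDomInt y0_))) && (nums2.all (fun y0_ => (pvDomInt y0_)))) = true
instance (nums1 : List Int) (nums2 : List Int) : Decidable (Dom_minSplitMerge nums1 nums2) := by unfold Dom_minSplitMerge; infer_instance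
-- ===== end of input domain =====

-- B replaces A's frontier BFS over implicitly discovered states by a global dynamic
-- program: enumerate all distinct arrangements up front, then run synchronous
-- relaxation rounds over every vertex until the distance table is a fixpoint
-- (objective: alternative; same results).

-- ===== PORT A =====
-- Shared neighbour enumeration: the literal triple loop
-- 'for i in range(n): for j in range(i+1, n+1): for k in range(len(rest))'
-- that BOTH Pythons contain verbatim (slices have nonnegative in-range bounds, so
-- Python's clamping slices are exactly List.take/List.drop here).
def pvNbrs (n : Nat) (lis : List Int) : List (List Int) :=
  (List.range n).flatMap (fun i =>
    (List.range' (i + 1) (n - i)).flatMap (fun j =>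
      let rest := lis.take i ++ lis.drop j
      (List.range rest.length).map (fun k =>
        rest.take k ++ (lis.drop i).take (j - i) ++ rest.drop k)))

-- the 'for lis in curr' body of A (iteration order of a Python set is not observable here:
-- the returned cnt is the same for every element of the level, see the proofs below)
def pvForA (n : Nat) (t2 : List Int) :
    List (List Int) → PySem.Set (List Int) → PySem.Set (List Int) → PySem.Set (List Int) → Int →
    Sum Int (PySem.Set (List Int) × PySem.Set (List Int))
  | [], seen, _nxt, curr, _cnt => .inr (seen, curr)
  | lis :: rest, seen, nxt, curr, cnt =>
    if lis ∈ seen then pvForA n t2 rest seen nxt curr cnt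
    else
      let seen' := PySem.Set.add seen lis
      if lis = t2 then .inl cnt
      else
        let nxt' := (pvNbrs n lis).foldl (fun s x => PySem.Set.add s x) nxt
        pvForA n t2 rest seen' nxt' (PySem.Set.diff nxt' seen') cnt

-- the 'while curr:' loop of A; fuel is a pure totality guard (never exhausted: each round
-- grows 'seen' inside the finite set of arrangements of nums1, see the proofs below)
def pvWhileA (n : Nat) (t2 : List Int) :
    Nat → PySem.Set (List Int) → PySem.Set (List Int) → Int → Int
  | 0, _, _, _ => -1
  | fuel + 1, seen, curr, cnt =>
    if curr = [] then -1
    else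
      match pvForA n t2 curr seen PySem.Set.empty curr (cnt + 1) with
      | .inl ans => ans
      | .inr (seen', curr') => pvWhileA n t2 fuel seen' curr' (cnt + 1)

def minSplitMerge (nums1 : List Int) (nums2 : List Int) : Int :=
  pvWhileA nums1.length nums2 (Nat.factorial nums1.length + 2)
    PySem.Set.empty (PySem.Set.ofList [nums1]) (-1)

-- ===== PORT B =====
-- B's 'arrangements(items)': all distinct orderings by first-occurrence recursion;
-- fuel (= items.length at every call) is a pure totality guard, never exhausted
def pvArr : Nat → List Int → List (List Int)
  | _, [] => [[]]
  | 0, _ => []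
  | fuel + 1, items =>
    ((List.range items.length).foldl
      (fun (p : List (List Int) × PySem.Set Int) idx =>
        let x := items.getD idx 0
        if x ∈ p.2 then p
        else (p.1 ++ (pvArr fuel (items.take idx ++ items.drop (idx + 1))).map (fun t => x :: t),
              PySem.Set.add p.2 x))
      ([], PySem.Set.empty)).1

-- one relaxation round of B: 'new = dict(dist); for u in verts: for nb in moves(n, u): …'
-- (dist[u] is ported as getD u 0: u ∈ verts is always a key of dist, see the proofs below)
def pvRelaxRound (n : Nat) (V : Int) (verts : List (List Int))
    (dist : PySem.Dict (List Int) Int) : PySem.Dict (List Int) Int :=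
  verts.foldl (fun new u =>
    let du := dist.getD u 0
    (pvNbrs n u).foldl (fun n2 nb =>
      if du + 1 < n2.getD nb V then n2.insert nb (du + 1) else n2) new) dist

-- B's 'while True: … if new == dist: break; dist = new'; fuel is a pure totality guard
-- (never exhausted: the table reaches its fixpoint within |verts| rounds, see the proofs)
def pvBFLoop (n : Nat) (V : Int) (verts : List (List Int)) :
    Nat → PySem.Dict (List Int) Int → PySem.Dict (List Int) Int
  | 0, dist => dist
  | fuel + 1, dist =>
    let new := pvRelaxRound n V verts dist
    if new = dist then dist else pvBFLoop n V verts fuel new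

def minSplitMerge_alt (nums1 : List Int) (nums2 : List Int) : Int :=
  let n := nums1.length
  let verts := pvArr nums1.length nums1
  let V : Int := verts.length
  let dist0 := (verts.foldl (fun d v => d.insert v V) PySem.Dict.empty).insert nums1 0
  let dist := pvBFLoop n V verts (verts.length + 2) dist0
  let d := dist.getD nums2 V
  if d < V then d else -1

-- ===== PRECONDITION & SPEC =====
def Spec_minSplitMerge (nums1 : List Int) (nums2 : List Int) (out : Int) : Prop := out = minSplitMerge_alt nums1 nums2
instance (nums1 : List Int) (nums2 : List Int) (out : Int) : Decidable (Spec_minSplitMerge nums1 nums2 out) := by unfold Spec_minSplitMerge; infer_instance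

-- ===== CLAIM (what is proved, stated in full; the proofs are below) =====
def Claim_equal_minSplitMerge : Prop := ∀ (nums1 : List Int) (nums2 : List Int), Dom_minSplitMerge nums1 nums2 → Spec_minSplitMerge nums1 nums2 (minSplitMerge nums1 nums2)

-- ===== LEMMAS AND PROOFS =====

-- reference: level-by-level BFS on Finsets, the common mathematical shape of both programs
def pvNbrF (n : Nat) (L : Finset (List Int)) : Finset (List Int) :=
  L.biUnion (fun x => (pvNbrs n x).toFinset)

def pvRefLoop (n : Nat) (t2 : List Int) :
    Nat → Finset (List Int) → Finset (List Int) → Int → Int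
  | 0, _, _, _ => -1
  | fuel + 1, S, L, cnt =>
    if L = ∅ then -1
    else if t2 ∈ L then cnt + 1
    else pvRefLoop n t2 fuel (S ∪ L) (pvNbrF n L \ (S ∪ L)) (cnt + 1)

-- the set reachable from s0 in at most k moves
def pvReach (n : Nat) (s0 : List Int) : Nat → Finset (List Int)
  | 0 => {s0}
  | k + 1 => pvReach n s0 k ∪ pvNbrF n (pvReach n s0 k)

-- the set already expanded before round k of the level BFS
def pvPrev (n : Nat) (s0 : List Int) : Nat → Finset (List Int)
  | 0 => ∅
  | k + 1 => pvReach n s0 k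

-- the distance table after r rounds of B: min #moves if ≤ r, else V
def pvCap (n : Nat) (s0 : List Int) (V : Int) (r : Nat) (v : List Int) : Int :=
  if hv : v ∈ pvReach n s0 r then
    ((Nat.find (show ∃ j, v ∈ pvReach n s0 j from ⟨r, hv⟩) : Nat) : Int) else V


-- nodup/membership of the Set-update folds A builds nxt with
lemma pv_mem_foldl_update (n : Nat) :
    ∀ (l : List (List Int)) (s : PySem.Set (List Int)) (y : List Int),
      (y ∈ l.foldl (fun s x => PySem.Set.update s (pvNbrs n x)) s ↔
        y ∈ s ∨ ∃ x ∈ l, y ∈ pvNbrs n x) := by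
  intro l
  induction l with
  | nil => intro s y; simp
  | cons a l ih =>
    intro s y
    simp only [List.foldl_cons, ih, PySem.Set.mem_update, List.mem_cons]
    constructor
    · rintro ((h | h) | ⟨x, hx, hy⟩)
      · exact Or.inl h
      · exact Or.inr ⟨a, Or.inl rfl, h⟩
      · exact Or.inr ⟨x, Or.inr hx, hy⟩
    · rintro (h | ⟨x, (rfl | hx), hy⟩)
      · exact Or.inl (Or.inl h)
      · exact Or.inl (Or.inr hy)
      · exact Or.inr ⟨x, hx, hy⟩

lemma pv_nodup_foldl_update (n : Nat) :
    ∀ (l : List (List Int)) (s : PySem.Set (List Int)), s.Nodup →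
      (l.foldl (fun s x => PySem.Set.update s (pvNbrs n x)) s).Nodup := by
  intro l
  induction l with
  | nil => intro s hs; simpa
  | cons a l ih =>
    intro s hs
    rw [List.foldl_cons]
    exact ih _ (PySem.Set.nodup_update _ _ hs)

-- every generated neighbour is a rearrangement of its source
lemma pvNbrs_perm (n : Nat) (lis nb : List Int) (h : nb ∈ pvNbrs n lis) : nb.Perm lis := by
  simp only [pvNbrs, List.mem_flatMap, List.mem_map, List.mem_range, List.mem_range'_1] at h
  obtain ⟨i, hi, j, hj, k, hk, rfl⟩ := h
  set rest := lis.take i ++ lis.drop j with hr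
  set seg := (lis.drop i).take (j - i) with hs
  have key : (seg ++ (lis.take i ++ lis.drop j)).Perm lis := by
    have : lis.take i ++ (seg ++ lis.drop j) = lis := by
      rw [hs, show lis.drop j = (lis.drop i).drop (j - i) by rw [List.drop_drop]; congr 1; omega]
      rw [List.take_append_drop, List.take_append_drop]
    calc (seg ++ (lis.take i ++ lis.drop j)).Perm (lis.take i ++ (seg ++ lis.drop j)) :=
          List.perm_append_comm_assoc _ _ _
      _ = lis := this
  rw [List.append_assoc]
  refine List.Perm.trans ?_ key
  have := List.perm_append_comm_assoc (rest.take k) seg (rest.drop k)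
  rw [List.take_append_drop] at this
  exact this

-- A's inner 'for lis in curr' loop, characterized
lemma pvForA_spec (n : Nat) (t2 : List Int) :
    ∀ (l : List (List Int)) (seen nxt currT : PySem.Set (List Int)) (cnt : Int),
      l.Nodup → (∀ x ∈ l, x ∉ seen) → t2 ∉ seen →
      pvForA n t2 l seen nxt currT cnt =
        if t2 ∈ l then Sum.inl cnt
        else Sum.inr (seen ++ l,
          if l = [] then currT
          else PySem.Set.diff (l.foldl (fun s x => PySem.Set.update s (pvNbrs n x)) nxt)
            (seen ++ l)) := by
  intro l
  induction l with
  | nil => intro seen nxt currT cnt _ _ _; simp [pvForA]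
  | cons lis rest ih =>
    intro seen nxt currT cnt hnd hdisj ht2
    have hlis : lis ∉ seen := hdisj lis (List.mem_cons_self ..)
    rw [pvForA, if_neg hlis]
    by_cases hlt : lis = t2
    · subst hlt
      simp [List.mem_cons]
    · rw [if_neg hlt]
      have hadd : PySem.Set.add seen lis = seen ++ [lis] := PySem.Set.add_of_not_mem hlis
      have hupd : (pvNbrs n lis).foldl (fun s x => PySem.Set.add s x) nxt
          = PySem.Set.update nxt (pvNbrs n lis) := rfl
      rw [hadd, hupd]
      rw [ih _ _ _ _ (List.Nodup.of_cons hnd)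
        (by
          intro x hx hx2
          rcases List.mem_append.mp hx2 with h | h
          · exact hdisj x (List.mem_cons_of_mem _ hx) h
          · exact (List.nodup_cons.mp hnd).1 ((List.mem_singleton.mp h) ▸ hx))
        (by
          intro hx
          rcases List.mem_append.mp hx with h | h
          · exact ht2 h
          · exact hlt (List.mem_singleton.mp h).symm)]
      by_cases hmem : t2 ∈ rest
      · rw [if_pos hmem, if_pos (List.mem_cons_of_mem _ hmem)]
      · have hne : t2 ∉ lis :: rest := by
          intro hx
          rcases List.mem_cons.mp hx with rfl | hx'
          · exact hlt rfl
          · exact hmem hx'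
        rw [if_neg hmem, if_neg hne]
        rcases rest with _ | ⟨r, rest⟩
        · simp
        · simp [List.append_assoc, List.foldl_cons]

-- A's while loop is the reference level BFS
lemma pvWhileA_ref (n : Nat) (t2 : List Int) :
    ∀ (fuel : Nat) (seen curr : PySem.Set (List Int)) (cnt : Int),
      seen.Nodup → curr.Nodup → (∀ x ∈ curr, x ∉ seen) → t2 ∉ seen →
      pvWhileA n t2 fuel seen curr cnt = pvRefLoop n t2 fuel seen.toFinset curr.toFinset cnt := by
  intro fuel
  induction fuel with
  | zero => intro seen curr cnt _ _ _ _; simp [pvWhileA, pvRefLoop]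
  | succ fuel ih =>
    intro seen curr cnt hseen hcurr hdisj ht2
    rw [pvWhileA, pvRefLoop]
    by_cases hc : curr = []
    · simp [hc]
    · have hcf : ¬(curr.toFinset = ∅) := by
        simpa [List.toFinset_eq_empty_iff] using hc
      rw [if_neg hc, if_neg hcf]
      rw [pvForA_spec n t2 curr seen PySem.Set.empty curr (cnt + 1) hcurr hdisj ht2]
      by_cases hm : t2 ∈ curr
      · rw [if_pos hm, if_pos (List.mem_toFinset.mpr hm)]
      · rw [if_neg hm, if_neg (fun h => hm (List.mem_toFinset.mp h)), if_neg hc]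
        have hseen' : (seen ++ curr).Nodup := by
          rw [List.nodup_append]
          exact ⟨hseen, hcurr, fun a ha b hb heq => hdisj b hb (heq ▸ ha)⟩
        have hnfold : (curr.foldl (fun s x => PySem.Set.update s (pvNbrs n x)) PySem.Set.empty).Nodup :=
          pv_nodup_foldl_update n curr PySem.Set.empty (by simp [PySem.Set.empty])
        have hcurr' : (PySem.Set.diff
            (curr.foldl (fun s x => PySem.Set.update s (pvNbrs n x)) PySem.Set.empty)
            (seen ++ curr)).Nodup := PySem.Set.nodup_diff _ _ hnfold
        have hdisj' : ∀ x ∈ PySem.Set.diff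
            (curr.foldl (fun s x => PySem.Set.update s (pvNbrs n x)) PySem.Set.empty)
            (seen ++ curr), x ∉ seen ++ curr := by
          intro x hx
          exact ((PySem.Set.mem_diff _ _ _).mp hx).2
        have ht2' : t2 ∉ seen ++ curr := by
          intro hx
          rcases List.mem_append.mp hx with h | h
          · exact ht2 h
          · exact hm h
        show pvWhileA n t2 fuel (seen ++ curr)
          (PySem.Set.diff (curr.foldl (fun s x => PySem.Set.update s (pvNbrs n x)) PySem.Set.empty)
            (seen ++ curr)) (cnt + 1) = _
        rw [ih _ _ _ hseen' hcurr' hdisj' ht2']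
        have e1 : (seen ++ curr).toFinset = seen.toFinset ∪ curr.toFinset := List.toFinset_append
        have e2 : (PySem.Set.diff
            (curr.foldl (fun s x => PySem.Set.update s (pvNbrs n x)) PySem.Set.empty)
            (seen ++ curr)).toFinset
            = pvNbrF n curr.toFinset \ (seen.toFinset ∪ curr.toFinset) := by
          ext x
          rw [List.mem_toFinset, PySem.Set.mem_diff, pv_mem_foldl_update]
          simp only [PySem.Set.empty, List.not_mem_nil, false_or, List.mem_append,
            Finset.mem_sdiff, Finset.mem_union, pvNbrF, Finset.mem_biUnion, List.mem_toFinset]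
        rw [e1, e2]

-- basic facts about the reach sets
lemma pvReach_mono_succ (n : Nat) (s0 : List Int) (k : Nat) :
    pvReach n s0 k ⊆ pvReach n s0 (k + 1) := by
  rw [pvReach]; exact Finset.subset_union_left

lemma pvReach_mono (n : Nat) (s0 : List Int) {j m : Nat} (h : j ≤ m) :
    pvReach n s0 j ⊆ pvReach n s0 m := by
  induction m with
  | zero => simp [Nat.le_zero.mp h]
  | succ m ih =>
    rcases Nat.lt_or_ge j (m + 1) with hlt | hge
    · exact (ih (Nat.lt_succ_iff.mp hlt)).trans (pvReach_mono_succ n s0 m)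
    · have : j = m + 1 := le_antisymm h hge
      simp [this]

lemma pvNbr_reach (n : Nat) (s0 : List Int) {k : Nat} {u v : List Int}
    (hu : u ∈ pvReach n s0 k) (hv : v ∈ pvNbrs n u) : v ∈ pvReach n s0 (k + 1) := by
  rw [pvReach]
  exact Finset.mem_union_right _ (Finset.mem_biUnion.mpr ⟨u, hu, List.mem_toFinset.mpr hv⟩)

lemma pvReach_stable (n : Nat) (s0 : List Int) {k : Nat}
    (h : pvReach n s0 (k + 1) = pvReach n s0 k) :
    ∀ m, k ≤ m → pvReach n s0 m = pvReach n s0 k := by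
  intro m hm
  obtain ⟨d, rfl⟩ := Nat.exists_eq_add_of_le hm
  induction d with
  | zero => rfl
  | succ d ih =>
    have := ih (Nat.le_add_right _ _)
    show pvReach n s0 ((k + d) + 1) = _
    rw [pvReach, this, ← pvReach, h]

lemma pvReach_subset (n : Nat) (s0 : List Int) (P : Finset (List Int)) (hs0 : s0 ∈ P)
    (hP : ∀ x ∈ P, ∀ y ∈ pvNbrs n x, y ∈ P) : ∀ k, pvReach n s0 k ⊆ P := by
  intro k
  induction k with
  | zero => simpa [pvReach]
  | succ k ih =>
    rw [pvReach]
    intro v hv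
    rcases Finset.mem_union.mp hv with h | h
    · exact ih h
    · obtain ⟨u, hu, hvu⟩ := Finset.mem_biUnion.mp h
      exact hP u (ih hu) v (List.mem_toFinset.mp hvu)

lemma pvMem_reach_iff (n : Nat) (s0 v : List Int) (h : ∃ j, v ∈ pvReach n s0 j) (m : Nat) :
    v ∈ pvReach n s0 m ↔ Nat.find h ≤ m := by
  constructor
  · intro hm; exact Nat.find_min' h hm
  · intro hle; exact pvReach_mono n s0 hle (Nat.find_spec h)

lemma pvFind_card (n : Nat) (s0 : List Int) (P : Finset (List Int)) (hs0 : s0 ∈ P)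
    (hP : ∀ x ∈ P, ∀ y ∈ pvNbrs n x, y ∈ P) (v : List Int) (h : ∃ j, v ∈ pvReach n s0 j) :
    Nat.find h + 1 ≤ P.card := by
  have aux : ∀ j, j ≤ Nat.find h → j + 1 ≤ (pvReach n s0 j).card := by
    intro j
    induction j with
    | zero =>
      intro _
      simp [pvReach]
    | succ j ih =>
      intro hj
      have hne : pvReach n s0 (j + 1) ≠ pvReach n s0 j := by
        intro heq
        have hst := pvReach_stable n s0 heq (Nat.find h) (by omega)
        have : v ∈ pvReach n s0 j := hst ▸ Nat.find_spec h
        have := Nat.find_min' h this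
        omega
      have hss : pvReach n s0 j ⊂ pvReach n s0 (j + 1) :=
        Finset.ssubset_iff_subset_ne.mpr ⟨pvReach_mono_succ n s0 j, fun heq => hne heq.symm⟩
      have := Finset.card_lt_card hss
      have := ih (by omega)
      omega
  have h1 := aux (Nat.find h) le_rfl
  have h2 := Finset.card_le_card (pvReach_subset n s0 P hs0 hP (Nat.find h))
  omega

lemma pvPrev_subset (n : Nat) (s0 : List Int) (k : Nat) :
    pvPrev n s0 k ⊆ pvReach n s0 k := by
  cases k with
  | zero => simp [pvPrev]
  | succ k => exact pvReach_mono_succ n s0 k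

lemma pvFrontier (n : Nat) (s0 : List Int) (k : Nat) :
    pvNbrF n (pvReach n s0 k \ pvPrev n s0 k) \ pvReach n s0 k
      = pvReach n s0 (k + 1) \ pvReach n s0 k := by
  ext v
  simp only [Finset.mem_sdiff, pvNbrF, Finset.mem_biUnion, List.mem_toFinset]
  constructor
  · rintro ⟨⟨u, hu, hvu⟩, hnot⟩
    exact ⟨pvNbr_reach n s0 hu.1 hvu, hnot⟩
  · rintro ⟨hv1, hv2⟩
    refine ⟨?_, hv2⟩
    have : v ∈ pvNbrF n (pvReach n s0 k) := by
      rw [pvReach] at hv1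
      rcases Finset.mem_union.mp hv1 with h | h
      · exact absurd h hv2
      · exact h
    obtain ⟨u, hu, hvu⟩ := Finset.mem_biUnion.mp this
    refine ⟨u, ⟨hu, ?_⟩, List.mem_toFinset.mp hvu⟩
    intro hup
    cases k with
    | zero => simp [pvPrev] at hup
    | succ k =>
      exact hv2 (pvNbr_reach n s0 hup (List.mem_toFinset.mp hvu))


-- the reference level BFS, characterized by the reach sets
lemma pvRefLoop_char (n : Nat) (t2 s0 : List Int) (P : Finset (List Int)) (hs0 : s0 ∈ P)
    (hP : ∀ x ∈ P, ∀ y ∈ pvNbrs n x, y ∈ P) :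
    ∀ (fuel k : Nat),
      P.card + 1 ≤ fuel + (pvPrev n s0 k).card → t2 ∉ pvPrev n s0 k →
      (∀ (h : ∃ j, t2 ∈ pvReach n s0 j),
        pvRefLoop n t2 fuel (pvPrev n s0 k) (pvReach n s0 k \ pvPrev n s0 k) ((k : Int) - 1)
          = ((Nat.find h : Nat) : Int)) ∧
      ((¬ ∃ j, t2 ∈ pvReach n s0 j) →
        pvRefLoop n t2 fuel (pvPrev n s0 k) (pvReach n s0 k \ pvPrev n s0 k) ((k : Int) - 1)
          = -1) := by
  intro fuel
  induction fuel with
  | zero =>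
    intro k hfuel ht2
    exfalso
    have h1 : (pvPrev n s0 k).card ≤ P.card := by
      apply Finset.card_le_card
      exact (pvPrev_subset n s0 k).trans (pvReach_subset n s0 P hs0 hP k)
    omega
  | succ fuel ih =>
    intro k hfuel ht2
    by_cases hL : pvReach n s0 k \ pvPrev n s0 k = ∅
    · -- saturation: the frontier is empty, nothing is reachable beyond pvPrev
      have hsub : pvReach n s0 k ⊆ pvPrev n s0 k := by
        intro x hx
        by_contra hx2
        exact Finset.notMem_empty x (hL ▸ Finset.mem_sdiff.mpr ⟨hx, hx2⟩)
      have hnex : ¬ ∃ j, t2 ∈ pvReach n s0 j := by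
        cases k with
        | zero =>
          exfalso
          have : s0 ∈ pvPrev n s0 0 := hsub (by simp [pvReach])
          simp [pvPrev] at this
        | succ k =>
          have heq : pvReach n s0 (k + 1) = pvReach n s0 k :=
            le_antisymm hsub (pvReach_mono_succ n s0 k)
          rintro ⟨j, hj⟩
          rcases Nat.le_total j k with hjk | hjk
          · exact ht2 (pvReach_mono n s0 hjk hj)
          · rw [pvReach_stable n s0 heq j hjk] at hj
            exact ht2 hj
      constructor
      · intro h; exact absurd h hnex
      · intro _
        rw [pvRefLoop, if_pos hL]
    · rw [pvRefLoop, if_neg hL]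
      by_cases hmem : t2 ∈ pvReach n s0 k \ pvPrev n s0 k
      · -- found at this level: the distance is exactly k
        rw [if_pos hmem]
        have ht2k : t2 ∈ pvReach n s0 k := (Finset.mem_sdiff.mp hmem).1
        have hex : ∃ j, t2 ∈ pvReach n s0 j := ⟨k, ht2k⟩
        have hfind : Nat.find hex = k := by
          apply le_antisymm (Nat.find_min' hex ht2k)
          by_contra hlt
          push Not at hlt
          have hfk : Nat.find hex ≤ k - 1 := by omega
          have hk1 : 1 ≤ k := by
            rcases Nat.eq_zero_or_pos k with rfl | h
            · omega
            · omega
          have : t2 ∈ pvReach n s0 (k - 1) :=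
            pvReach_mono n s0 hfk (Nat.find_spec hex)
          have : t2 ∈ pvPrev n s0 k := by
            cases k with
            | zero => omega
            | succ k => simpa [pvPrev] using this
          exact ht2 this
        refine ⟨fun h => ?_, fun h => absurd hex h⟩
        have : Nat.find h = Nat.find hex := rfl
        rw [this, hfind]
        omega
      · rw [if_neg hmem]
        -- recurse at level k + 1
        have hprevs : pvPrev n s0 k ⊆ pvReach n s0 k := pvPrev_subset n s0 k
        have hSL : pvPrev n s0 k ∪ (pvReach n s0 k \ pvPrev n s0 k) = pvReach n s0 k :=
          Finset.union_sdiff_of_subset hprevs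
        have ht2' : t2 ∉ pvPrev n s0 (k + 1) := by
          show t2 ∉ pvReach n s0 k
          intro hx
          exact hmem (Finset.mem_sdiff.mpr ⟨hx, ht2⟩)
        have hcard : (pvPrev n s0 k).card + 1 ≤ (pvReach n s0 k).card := by
          have hss : pvPrev n s0 k ⊂ pvReach n s0 k := by
            refine Finset.ssubset_iff_subset_ne.mpr ⟨hprevs, ?_⟩
            intro heq
            obtain ⟨x, hx⟩ := Finset.nonempty_iff_ne_empty.mpr hL
            have := Finset.mem_sdiff.mp hx
            rw [← heq] at this
            exact this.2 this.1
          exact Finset.card_lt_card hss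
        have hrec := ih (k + 1)
          (by
            show P.card + 1 ≤ fuel + (pvReach n s0 k).card
            omega)
          ht2'
        have harg : pvRefLoop n t2 fuel
            (pvPrev n s0 k ∪ (pvReach n s0 k \ pvPrev n s0 k))
            (pvNbrF n (pvReach n s0 k \ pvPrev n s0 k)
              \ (pvPrev n s0 k ∪ (pvReach n s0 k \ pvPrev n s0 k)))
            ((k : Int) - 1 + 1)
            = pvRefLoop n t2 fuel (pvPrev n s0 (k + 1))
              (pvReach n s0 (k + 1) \ pvPrev n s0 (k + 1)) (((k + 1 : Nat) : Int) - 1) := by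
          rw [hSL]
          have : pvNbrF n (pvReach n s0 k \ pvPrev n s0 k) \ pvReach n s0 k
              = pvReach n s0 (k + 1) \ pvReach n s0 k := pvFrontier n s0 k
          rw [this]
          have hc : ((k : Int) - 1 + 1) = (((k + 1 : Nat) : Int) - 1) := by push_cast; ring
          rw [hc]
          rfl
        rw [harg]
        exact hrec

-- Port A computes the BFS distance from nums1 to nums2 (or -1 when unreachable)
lemma pvA_char (nums1 nums2 : List Int) :
    (∀ (h : ∃ j, nums2 ∈ pvReach nums1.length nums1 j),
      minSplitMerge nums1 nums2 = ((Nat.find h : Nat) : Int)) ∧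
    ((¬ ∃ j, nums2 ∈ pvReach nums1.length nums1 j) → minSplitMerge nums1 nums2 = -1) := by
  have hP : ∀ x ∈ nums1.permutations.toFinset, ∀ y ∈ pvNbrs nums1.length x,
      y ∈ nums1.permutations.toFinset := by
    intro x hx y hy
    rw [List.mem_toFinset, List.mem_permutations] at hx ⊢
    exact (pvNbrs_perm _ _ _ hy).trans hx
  have hs0 : nums1 ∈ nums1.permutations.toFinset := by
    rw [List.mem_toFinset, List.mem_permutations]
  have hcard : (nums1.permutations.toFinset : Finset (List Int)).card ≤ Nat.factorial nums1.length := by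
    calc nums1.permutations.toFinset.card ≤ nums1.permutations.length := List.toFinset_card_le _
      _ = Nat.factorial nums1.length := List.length_permutations nums1
  have hA := pvWhileA_ref nums1.length nums2 (Nat.factorial nums1.length + 2)
    PySem.Set.empty (PySem.Set.ofList [nums1]) (-1)
    (by simp [PySem.Set.empty]) (PySem.Set.nodup_ofList _)
    (by intro z _ hz; simp [PySem.Set.empty] at hz) (by simp [PySem.Set.empty])
  have hchar := pvRefLoop_char nums1.length nums2 nums1 nums1.permutations.toFinset hs0 hP
    (Nat.factorial nums1.length + 2) 0
    (by simp [pvPrev]; omega) (by simp [pvPrev])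
  have hsets : (PySem.Set.empty : PySem.Set (List Int)).toFinset = pvPrev nums1.length nums1 0 ∧
      (PySem.Set.ofList [nums1] : PySem.Set (List Int)).toFinset
        = pvReach nums1.length nums1 0 \ pvPrev nums1.length nums1 0 := by
    constructor
    · simp [PySem.Set.empty, pvPrev]
    · show ([nums1] : List (List Int)).toFinset = _
      simp [pvReach, pvPrev]
  have heq : minSplitMerge nums1 nums2
      = pvRefLoop nums1.length nums2 (Nat.factorial nums1.length + 2)
        (pvPrev nums1.length nums1 0)
        (pvReach nums1.length nums1 0 \ pvPrev nums1.length nums1 0) ((0 : Int) - 1) := by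
    show pvWhileA nums1.length nums2 (Nat.factorial nums1.length + 2)
        PySem.Set.empty (PySem.Set.ofList [nums1]) (-1) = _
    rw [hA, hsets.1, hsets.2]
    norm_num
  constructor
  · intro h
    rw [heq]
    have := hchar.1 h
    simpa using this
  · intro h
    rw [heq]
    have := hchar.2 h
    simpa using this


-- the loop body of B's 'arrangements', named so the fold can be characterized
def pvArrStep (fuel : Nat) (items : List Int) :
    (List (List Int) × PySem.Set Int) → Nat → (List (List Int) × PySem.Set Int) :=
  fun p idx =>
    let x := items.getD idx 0
    if x ∈ p.2 then p
    else (p.1 ++ (pvArr fuel (items.take idx ++ items.drop (idx + 1))).map (fun t => x :: t),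
          PySem.Set.add p.2 x)

lemma pvArr_nil (fuel : Nat) : pvArr fuel [] = [[]] := by
  cases fuel <;> rfl

lemma pvArr_cons (fuel : Nat) (a : Int) (l : List Int) :
    pvArr (fuel + 1) (a :: l)
      = ((List.range (a :: l).length).foldl (pvArrStep fuel (a :: l))
          ([], PySem.Set.empty)).1 := rfl

lemma pvArrFold_spec (fuel : Nat) (items : List Int) :
    ∀ m, m ≤ items.length →
      (∀ z : Int, z ∈ ((List.range m).foldl (pvArrStep fuel items) ([], PySem.Set.empty)).2
          ↔ z ∈ items.take m) ∧
      (∀ v, v ∈ ((List.range m).foldl (pvArrStep fuel items) ([], PySem.Set.empty)).1 ↔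
        ∃ idx, idx < m ∧ items.getD idx 0 ∉ items.take idx ∧
          ∃ t ∈ pvArr fuel (items.take idx ++ items.drop (idx + 1)),
            v = items.getD idx 0 :: t) := by
  intro m
  induction m with
  | zero =>
    intro _
    constructor
    · intro z; simp [PySem.Set.empty]
    · intro v; simp
  | succ m ih =>
    intro hm
    have hmlt : m < items.length := by omega
    obtain ⟨ihu, iho⟩ := ih (by omega)
    rw [List.range_succ, List.foldl_append]
    set p := (List.range m).foldl (pvArrStep fuel items) ([], PySem.Set.empty) with hp
    have hstep : List.foldl (pvArrStep fuel items) p [m] = pvArrStep fuel items p m := rfl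
    rw [hstep]
    have hgd : items.getD m 0 = items[m] := List.getD_eq_getElem items 0 hmlt
    have htake : items.take (m + 1) = items.take m ++ [items[m]] :=
      List.take_succ_eq_append_getElem hmlt
    by_cases hx : items.getD m 0 ∈ p.2
    · have hxt : items[m] ∈ items.take m := (ihu _).mp (hgd ▸ hx)
      rw [pvArrStep, if_pos hx]
      constructor
      · intro z
        rw [ihu z, htake]
        simp only [List.mem_append, List.mem_singleton]
        constructor
        · exact Or.inl
        · rintro (h | rfl)
          · exact h
          · exact hxt
      · intro v
        rw [iho v]
        constructor
        · rintro ⟨idx, hidx, hrest⟩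
          exact ⟨idx, by omega, hrest⟩
        · rintro ⟨idx, hidx, hfirst, hrest⟩
          refine ⟨idx, ?_, hfirst, hrest⟩
          rcases Nat.lt_succ_iff_lt_or_eq.mp hidx with h | rfl
          · exact h
          · exact absurd (hgd ▸ hxt) hfirst
    · rw [pvArrStep, if_neg hx]
      constructor
      · intro z
        show z ∈ PySem.Set.add p.2 (items.getD m 0) ↔ _
        rw [PySem.Set.mem_add, ihu z, htake]
        simp only [List.mem_append, List.mem_singleton, hgd]
      · intro v
        show v ∈ p.1 ++ _ ↔ _
        rw [List.mem_append, iho v]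
        constructor
        · rintro (⟨idx, hidx, hrest⟩ | hnew)
          · exact ⟨idx, by omega, hrest⟩
          · obtain ⟨t, ht, rfl⟩ := List.mem_map.mp hnew
            exact ⟨m, by omega, fun hc => hx ((ihu _).mpr hc), t, ht, rfl⟩
        · rintro ⟨idx, hidx, hfirst, t, ht, rfl⟩
          rcases Nat.lt_succ_iff_lt_or_eq.mp hidx with h | rfl
          · exact Or.inl ⟨idx, h, hfirst, t, ht, rfl⟩
          · exact Or.inr (List.mem_map.mpr ⟨t, ht, rfl⟩)

-- B's 'arrangements' enumerates exactly the rearrangements of its input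
lemma pvArr_mem : ∀ (fuel : Nat) (l : List Int), l.length ≤ fuel →
    ∀ v, v ∈ pvArr fuel l ↔ v.Perm l := by
  intro fuel
  induction fuel with
  | zero =>
    intro l hl v
    have : l = [] := List.length_eq_zero_iff.mp (Nat.le_zero.mp hl)
    subst this
    rw [pvArr_nil]
    simp [List.perm_nil]
  | succ fuel ih =>
    intro l hl v
    cases l with
    | nil =>
      rw [pvArr_nil]
      simp [List.perm_nil]
    | cons a l' =>
      rw [pvArr_cons, (pvArrFold_spec fuel (a :: l') (a :: l').length le_rfl).2 v]
      set items := a :: l' with hitems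
      constructor
      · rintro ⟨idx, hidx, hfirst, t, ht, rfl⟩
        have hrl : (items.take idx ++ items.drop (idx + 1)).length ≤ fuel := by
          rw [List.length_append, List.length_take, List.length_drop]
          simp only [hitems] at hl hidx ⊢
          omega
        have htp : t.Perm (items.take idx ++ items.drop (idx + 1)) :=
          (ih _ hrl t).mp ht
        have hdecomp : items = items.take idx ++ items[idx] :: items.drop (idx + 1) := by
          conv_lhs => rw [← List.take_append_drop idx items]
          rw [List.drop_eq_getElem_cons hidx]
        rw [List.getD_eq_getElem items 0 hidx]
        refine (htp.cons items[idx]).trans ?_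
        conv_rhs => rw [hdecomp]
        exact List.perm_middle.symm
      · intro hperm
        cases v with
        | nil =>
          exfalso
          have := hperm.length_eq
          simp [hitems] at this
        | cons x t =>
          have hxmem : x ∈ items := hperm.subset (List.mem_cons_self ..)
          have hlt : items.idxOf x < items.length := List.idxOf_lt_length_of_mem hxmem
          have hget : items[items.idxOf x] = x := List.getElem_idxOf hlt
          have hfirst : items.getD (items.idxOf x) 0 ∉ items.take (items.idxOf x) := by
            rw [List.getD_eq_getElem items 0 hlt, hget]
            intro hc
            have := (List.mem_take_iff_idxOf_lt hxmem).mp hc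
            omega
          have h1 : items.drop (items.idxOf x) = x :: items.drop (items.idxOf x + 1) := by
            rw [List.drop_eq_getElem_cons hlt, hget]
          have hdecomp : items
              = items.take (items.idxOf x) ++ x :: items.drop (items.idxOf x + 1) := by
            conv_lhs => rw [← List.take_append_drop (items.idxOf x) items, h1]
          have htp : t.Perm (items.take (items.idxOf x) ++ items.drop (items.idxOf x + 1)) := by
            have h2 : (x :: t).Perm
                (items.take (items.idxOf x) ++ x :: items.drop (items.idxOf x + 1)) :=
              hdecomp ▸ hperm
            exact (h2.trans List.perm_middle).cons_inv
          have hrl : (items.take (items.idxOf x) ++ items.drop (items.idxOf x + 1)).length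
              ≤ fuel := by
            rw [List.length_append, List.length_take, List.length_drop]
            simp only [hitems] at hl hlt ⊢
            omega
          refine ⟨items.idxOf x, hlt, hfirst, t, (ih _ hrl t).mpr htp, ?_⟩
          rw [List.getD_eq_getElem items 0 hlt, hget]


-- a present key's getD does not depend on the default
lemma pvGetD_irrel (d : PySem.Dict (List Int) Int) (k : List Int)
    (h : d.contains k = true) (a b : Int) : d.getD k a = d.getD k b := by
  have h2 : (d.get? k).isSome = true := by
    rw [← PySem.Dict.contains_eq_isSome_get?]; exact h
  obtain ⟨w, hw⟩ := Option.isSome_iff_exists.mp h2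
  rw [PySem.Dict.getD_eq_get?_getD, PySem.Dict.getD_eq_get?_getD, hw]
  rfl

-- the initial table {v: V for v in verts}
lemma pvFold_insert_getD (V : Int) :
    ∀ (verts : List (List Int)) (d : PySem.Dict (List Int) Int),
      (∀ w, d.getD w V = V) → ∀ w, (verts.foldl (fun d v => d.insert v V) d).getD w V = V := by
  intro verts
  induction verts with
  | nil => intro d h w; exact h w
  | cons v rest ih =>
    intro d h w
    rw [List.foldl_cons]
    refine ih _ (fun w => ?_) w
    rw [PySem.Dict.getD_insert]
    split <;> simp [h]

lemma pvFold_insert_contains (V : Int) :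
    ∀ (verts : List (List Int)) (d : PySem.Dict (List Int) Int) (u : List Int),
      (u ∈ verts ∨ d.contains u = true) →
      (verts.foldl (fun d v => d.insert v V) d).contains u = true := by
  intro verts
  induction verts with
  | nil =>
    intro d u h
    rcases h with h | h
    · simp at h
    · exact h
  | cons v rest ih =>
    intro d u h
    rw [List.foldl_cons]
    refine ih _ u ?_
    rcases h with h | h
    · rcases List.mem_cons.mp h with rfl | h'
      · right; rw [PySem.Dict.contains_insert]; simp
      · left; exact h'
    · right; rw [PySem.Dict.contains_insert, h]; simp

-- the inner 'for nb in moves(n, u)' fold of one relaxation, characterized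
lemma pvInner_getD (du V : Int) :
    ∀ (ns : List (List Int)) (new : PySem.Dict (List Int) Int) (v : List Int),
      ((ns.foldl (fun n2 nb =>
          if du + 1 < n2.getD nb V then n2.insert nb (du + 1) else n2) new).getD v V)
        = if v ∈ ns ∧ du + 1 < new.getD v V then du + 1 else new.getD v V := by
  intro ns
  induction ns with
  | nil => intro new v; simp
  | cons nb rest ih =>
    intro new v
    rw [List.foldl_cons, ih]
    by_cases hvnb : v = nb
    · subst hvnb
      by_cases hlt : du + 1 < new.getD v V
      · have h1 : (if du + 1 < new.getD v V then new.insert v (du + 1) else new).getD v V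
            = du + 1 := by rw [if_pos hlt, PySem.Dict.getD_insert_self]
        rw [h1]
        simp only [List.mem_cons, true_or, true_and, hlt, if_pos]
        split <;> omega
      · have h1 : (if du + 1 < new.getD v V then new.insert v (du + 1) else new).getD v V
            = new.getD v V := by rw [if_neg hlt]
        rw [h1]
        split_ifs with h2 h3 <;> omega
    · have h1 : (if du + 1 < new.getD nb V then new.insert nb (du + 1) else new).getD v V
          = new.getD v V := by
        split
        · rw [PySem.Dict.getD_insert, if_neg hvnb]
        · rfl
      rw [h1]
      by_cases hm : v ∈ rest <;> simp [List.mem_cons, hvnb, hm]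

lemma pvInner_contains (du V : Int) (w : List Int) :
    ∀ (ns : List (List Int)) (new : PySem.Dict (List Int) Int),
      new.contains w = true →
      ((ns.foldl (fun n2 nb =>
          if du + 1 < n2.getD nb V then n2.insert nb (du + 1) else n2) new).contains w)
        = true := by
  intro ns
  induction ns with
  | nil => intro new h; exact h
  | cons nb rest ih =>
    intro new h
    rw [List.foldl_cons]
    refine ih _ ?_
    split
    · rw [PySem.Dict.contains_insert, h]; simp
    · exact h

-- one whole relaxation round, as a pure fold on the looked-up value
lemma pvRelax_getD_aux (n : Nat) (V : Int) (dist : PySem.Dict (List Int) Int) (v : List Int) :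
    ∀ (verts : List (List Int)) (new : PySem.Dict (List Int) Int),
      (∀ u ∈ verts, dist.contains u = true) →
      ((verts.foldl (fun new u =>
          (pvNbrs n u).foldl (fun n2 nb =>
            if dist.getD u 0 + 1 < n2.getD nb V then n2.insert nb (dist.getD u 0 + 1) else n2)
          new) new).getD v V)
        = verts.foldl (fun m u =>
            if v ∈ pvNbrs n u ∧ dist.getD u V + 1 < m then dist.getD u V + 1 else m)
          (new.getD v V) := by
  intro verts
  induction verts with
  | nil => intro new _; rfl
  | cons u rest ih =>
    intro new hkeys
    rw [List.foldl_cons, List.foldl_cons,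
      ih _ (fun w hw => hkeys w (List.mem_cons_of_mem _ hw))]
    congr 1
    rw [pvInner_getD, pvGetD_irrel dist u (hkeys u (List.mem_cons_self ..)) 0 V]

lemma pvRelax_getD (n : Nat) (V : Int) (verts : List (List Int))
    (dist : PySem.Dict (List Int) Int) (v : List Int)
    (hkeys : ∀ u ∈ verts, dist.contains u = true) :
    (pvRelaxRound n V verts dist).getD v V
      = verts.foldl (fun m u =>
          if v ∈ pvNbrs n u ∧ dist.getD u V + 1 < m then dist.getD u V + 1 else m)
        (dist.getD v V) :=
  pvRelax_getD_aux n V dist v verts dist hkeys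

lemma pvRelax_contains_aux (n : Nat) (V : Int) (w : List Int)
    (dist : PySem.Dict (List Int) Int) :
    ∀ (vs : List (List Int)) (new : PySem.Dict (List Int) Int),
      new.contains w = true →
      ((vs.foldl (fun new u =>
          (pvNbrs n u).foldl (fun n2 nb =>
            if dist.getD u 0 + 1 < n2.getD nb V then n2.insert nb (dist.getD u 0 + 1) else n2)
          new) new).contains w) = true := by
  intro vs
  induction vs with
  | nil => intro new h; exact h
  | cons u rest ih =>
    intro new h
    rw [List.foldl_cons]
    exact ih _ (pvInner_contains _ V w _ new h)

lemma pvRelax_contains (n : Nat) (V : Int) (w : List Int) (verts : List (List Int))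
    (dist : PySem.Dict (List Int) Int) (h : dist.contains w = true) :
    (pvRelaxRound n V verts dist).contains w = true :=
  pvRelax_contains_aux n V w dist verts dist h

-- accumulator analysis for the pure fold of pvRelax_getD
lemma pvAcc_le_init (q : List Int → Prop) [DecidablePred q] (c : List Int → Int) :
    ∀ (us : List (List Int)) (m : Int),
      us.foldl (fun m u => if q u ∧ c u < m then c u else m) m ≤ m := by
  intro us
  induction us with
  | nil => intro m; exact le_refl m
  | cons u rest ih =>
    intro m
    rw [List.foldl_cons]
    refine le_trans (ih _) ?_
    split <;> omega

lemma pvAcc_le_cand (q : List Int → Prop) [DecidablePred q] (c : List Int → Int) :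
    ∀ (us : List (List Int)) (m : Int) (u : List Int), u ∈ us → q u →
      us.foldl (fun m u => if q u ∧ c u < m then c u else m) m ≤ c u := by
  intro us
  induction us with
  | nil => intro m u h; simp at h
  | cons w rest ih =>
    intro m u hu hq
    rw [List.foldl_cons]
    rcases List.mem_cons.mp hu with rfl | h'
    · refine le_trans (pvAcc_le_init q c rest _) ?_
      split_ifs with h
      · omega
      · have hnlt : ¬ c u < m := fun hlt => h ⟨hq, hlt⟩
        omega
    · exact ih _ u h' hq

lemma pvAcc_ge (q : List Int → Prop) [DecidablePred q] (c : List Int → Int) :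
    ∀ (us : List (List Int)) (m x : Int), x ≤ m → (∀ u ∈ us, q u → x ≤ c u) →
      x ≤ us.foldl (fun m u => if q u ∧ c u < m then c u else m) m := by
  intro us
  induction us with
  | nil => intro m x h _; exact h
  | cons u rest ih =>
    intro m x h hc
    rw [List.foldl_cons]
    refine ih _ x ?_ (fun w hw hq => hc w (List.mem_cons_of_mem _ hw) hq)
    split_ifs with hs
    · exact hc u (List.mem_cons_self ..) hs.1
    · exact h


-- one relaxation round advances the capped distance table by one level
lemma pvStep (n : Nat) (s0 : List Int) (verts : List (List Int)) (V : Int)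
    (hverts : ∀ v, v ∈ verts ↔ v.Perm s0) (hV : V = (verts.length : Int))
    (r : Nat) (dist : PySem.Dict (List Int) Int)
    (hval : ∀ v, dist.getD v V = pvCap n s0 V r v)
    (hkeys : ∀ u ∈ verts, dist.contains u = true) :
    ∀ v, (pvRelaxRound n V verts dist).getD v V = pvCap n s0 V (r + 1) v := by
  have hs0P : s0 ∈ verts.toFinset := List.mem_toFinset.mpr ((hverts s0).mpr (List.Perm.refl s0))
  have hPc : ∀ x ∈ verts.toFinset, ∀ y ∈ pvNbrs n x, y ∈ verts.toFinset := by
    intro x hx y hy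
    rw [List.mem_toFinset, hverts] at hx ⊢
    exact (pvNbrs_perm n x y hy).trans hx
  have hfindV : ∀ (v : List Int) (h : ∃ j, v ∈ pvReach n s0 j), ((Nat.find h : Nat) : Int) < V := by
    intro v h
    have h1 := pvFind_card n s0 verts.toFinset hs0P hPc v h
    have h2 := List.toFinset_card_le verts
    rw [hV]
    omega
  have hRverts : ∀ {k : Nat} {u : List Int}, u ∈ pvReach n s0 k → u ∈ verts := by
    intro k u hu
    exact List.mem_toFinset.mp (pvReach_subset n s0 verts.toFinset hs0P hPc k hu)
  intro v
  rw [pvRelax_getD n V verts dist v hkeys, hval v]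
  by_cases hv : v ∈ pvReach n s0 r
  · -- already reached: the value stays the minimal level
    have h : ∃ j, v ∈ pvReach n s0 j := ⟨r, hv⟩
    have hinit : pvCap n s0 V r v = ((Nat.find h : Nat) : Int) := by
      rw [pvCap, dif_pos hv]
    have hcap1 : pvCap n s0 V (r + 1) v = ((Nat.find h : Nat) : Int) := by
      rw [pvCap, dif_pos (pvReach_mono_succ n s0 r hv)]
    rw [hinit, hcap1]
    apply le_antisymm
    · exact pvAcc_le_init (fun u => v ∈ pvNbrs n u) (fun u => dist.getD u V + 1) verts _
    · refine pvAcc_ge (fun u => v ∈ pvNbrs n u) (fun u => dist.getD u V + 1) verts _ _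
        le_rfl ?_
      intro u _ hq
      show ((Nat.find h : Nat) : Int) ≤ dist.getD u V + 1
      rw [hval u]
      by_cases hu : u ∈ pvReach n s0 r
      · have hu2 : ∃ j, u ∈ pvReach n s0 j := ⟨r, hu⟩
        rw [pvCap, dif_pos hu]
        have hreach : v ∈ pvReach n s0 (Nat.find hu2 + 1) :=
          pvNbr_reach n s0 (Nat.find_spec hu2) hq
        have := Nat.find_min' h hreach
        omega
      · rw [pvCap, dif_neg hu]
        have := hfindV v h
        omega
  · by_cases hv2 : v ∈ pvReach n s0 (r + 1)
    · -- newly reached: exactly one more than some previous-level neighbour source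
      have h : ∃ j, v ∈ pvReach n s0 j := ⟨r + 1, hv2⟩
      have hfindv : Nat.find h = r + 1 := by
        apply le_antisymm (Nat.find_min' h hv2)
        by_contra hc
        push Not at hc
        exact hv ((pvMem_reach_iff n s0 v h r).mpr (by omega))
      have hinit : pvCap n s0 V r v = V := by rw [pvCap, dif_neg hv]
      have hcap1 : pvCap n s0 V (r + 1) v = ((r + 1 : Nat) : Int) := by
        rw [pvCap, dif_pos hv2]
        have : Nat.find (⟨r + 1, hv2⟩ : ∃ j, v ∈ pvReach n s0 j) = Nat.find h := rfl
        rw [this, hfindv]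
      rw [hinit, hcap1]
      obtain ⟨u, hu, hvN⟩ : ∃ u ∈ pvReach n s0 r, v ∈ pvNbrs n u := by
        rw [pvReach] at hv2
        rcases Finset.mem_union.mp hv2 with hcase | hcase
        · exact absurd hcase hv
        · obtain ⟨u, hu, hvu⟩ := Finset.mem_biUnion.mp hcase
          exact ⟨u, hu, List.mem_toFinset.mp hvu⟩
      have huV : u ∈ verts := hRverts hu
      have hrV : ((r : Nat) : Int) + 1 < V := by
        have := hfindV v h
        rw [hfindv] at this
        push_cast at this
        omega
      apply le_antisymm
      · refine le_trans (pvAcc_le_cand (fun u => v ∈ pvNbrs n u)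
          (fun u => dist.getD u V + 1) verts _ u huV hvN) ?_
        show dist.getD u V + 1 ≤ ((r + 1 : Nat) : Int)
        rw [hval u, pvCap, dif_pos hu]
        have : Nat.find (⟨r, hu⟩ : ∃ j, u ∈ pvReach n s0 j) ≤ r := Nat.find_min' _ hu
        push_cast
        omega
      · refine pvAcc_ge (fun u => v ∈ pvNbrs n u) (fun u => dist.getD u V + 1) verts _ _
          (by push_cast; omega) ?_
        intro w _ hq
        show ((r + 1 : Nat) : Int) ≤ dist.getD w V + 1
        rw [hval w]
        by_cases hw : w ∈ pvReach n s0 r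
        · have hw2 : ∃ j, w ∈ pvReach n s0 j := ⟨r, hw⟩
          rw [pvCap, dif_pos hw]
          have hge : r ≤ Nat.find hw2 := by
            by_contra hc
            push Not at hc
            have hstep : v ∈ pvReach n s0 (Nat.find hw2 + 1) :=
              pvNbr_reach n s0 (Nat.find_spec hw2) hq
            exact hv (pvReach_mono n s0 (by omega) hstep)
          omega
        · rw [pvCap, dif_neg hw]
          push_cast
          omega
    · -- still unreached: the value stays V
      have hinit : pvCap n s0 V r v = V := by rw [pvCap, dif_neg hv]
      have hcap1 : pvCap n s0 V (r + 1) v = V := by rw [pvCap, dif_neg hv2]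
      rw [hinit, hcap1]
      apply le_antisymm
      · exact pvAcc_le_init (fun u => v ∈ pvNbrs n u) (fun u => dist.getD u V + 1) verts _
      · refine pvAcc_ge (fun u => v ∈ pvNbrs n u) (fun u => dist.getD u V + 1) verts _ _
          le_rfl ?_
        intro w _ hq
        show V ≤ dist.getD w V + 1
        rw [hval w]
        by_cases hw : w ∈ pvReach n s0 r
        · exact absurd (pvNbr_reach n s0 hw hq) hv2
        · rw [pvCap, dif_neg hw]
          omega


-- B's fixpoint loop computes the stabilized table
lemma pvBFLoop_spec (n : Nat) (s0 : List Int) (verts : List (List Int)) (V : Int)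
    (hverts : ∀ v, v ∈ verts ↔ v.Perm s0) (hV : V = (verts.length : Int)) :
    ∀ (fuel r : Nat) (dist : PySem.Dict (List Int) Int),
      (∀ v, dist.getD v V = pvCap n s0 V r v) →
      (∀ u ∈ verts, dist.contains u = true) →
      verts.toFinset.card ≤ r + fuel →
      ∀ v,
        (∀ (hv : ∃ j, v ∈ pvReach n s0 j),
          (pvBFLoop n V verts fuel dist).getD v V = ((Nat.find hv : Nat) : Int)) ∧
        ((¬ ∃ j, v ∈ pvReach n s0 j) → (pvBFLoop n V verts fuel dist).getD v V = V) := by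
  have hs0P : s0 ∈ verts.toFinset := List.mem_toFinset.mpr ((hverts s0).mpr (List.Perm.refl s0))
  have hPc : ∀ x ∈ verts.toFinset, ∀ y ∈ pvNbrs n x, y ∈ verts.toFinset := by
    intro x hx y hy
    rw [List.mem_toFinset, hverts] at hx ⊢
    exact (pvNbrs_perm n x y hy).trans hx
  have hfindC : ∀ (v : List Int) (h : ∃ j, v ∈ pvReach n s0 j),
      Nat.find h + 1 ≤ verts.toFinset.card :=
    fun v h => pvFind_card n s0 verts.toFinset hs0P hPc v h
  intro fuel
  induction fuel with
  | zero =>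
    intro r dist hval hkeys hcard v
    show (∀ _, dist.getD v V = _) ∧ (_ → dist.getD v V = V)
    constructor
    · intro hv
      have hfr : Nat.find hv < r := by
        have := hfindC v hv
        omega
      have hvr : v ∈ pvReach n s0 r := (pvMem_reach_iff n s0 v hv r).mpr (by omega)
      rw [hval v, pvCap, dif_pos hvr]
    · intro hv
      rw [hval v, pvCap, dif_neg (fun hc => hv ⟨r, hc⟩)]
  | succ fuel ih =>
    intro r dist hval hkeys hcard v
    have hval' : ∀ v, (pvRelaxRound n V verts dist).getD v V = pvCap n s0 V (r + 1) v :=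
      pvStep n s0 verts V hverts hV r dist hval hkeys
    have hkeys' : ∀ u ∈ verts, (pvRelaxRound n V verts dist).contains u = true :=
      fun u hu => pvRelax_contains n V u verts dist (hkeys u hu)
    rw [pvBFLoop]
    by_cases heq : pvRelaxRound n V verts dist = dist
    · rw [if_pos heq]
      -- the table is a fixpoint: the reach sets are saturated at level r
      have hcapeq : ∀ w, pvCap n s0 V (r + 1) w = pvCap n s0 V r w := by
        intro w
        rw [← hval' w, heq, hval w]
      have hsat : pvReach n s0 (r + 1) = pvReach n s0 r := by
        apply le_antisymm ?_ (pvReach_mono_succ n s0 r)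
        intro w hw1
        by_contra hw0
        have hex : ∃ j, w ∈ pvReach n s0 j := ⟨r + 1, hw1⟩
        have hfw : Nat.find hex = r + 1 := by
          apply le_antisymm (Nat.find_min' hex hw1)
          by_contra hc
          push Not at hc
          exact hw0 ((pvMem_reach_iff n s0 w hex r).mpr (by omega))
        have h1 : pvCap n s0 V (r + 1) w = ((Nat.find hex : Nat) : Int) := by
          rw [pvCap, dif_pos hw1]
        have h2 : pvCap n s0 V r w = V := by rw [pvCap, dif_neg hw0]
        have h3 := hcapeq w
        rw [h1, h2, hfw] at h3
        have h4 := hfindC w hex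
        have h5 := List.toFinset_card_le verts
        rw [hfw] at h4
        rw [hV] at h3
        omega
      constructor
      · intro hv
        have hle : Nat.find hv ≤ r := by
          by_contra hc
          push Not at hc
          have : v ∈ pvReach n s0 (Nat.find hv) := Nat.find_spec hv
          rw [pvReach_stable n s0 hsat (Nat.find hv) (by omega)] at this
          have := Nat.find_min' hv this
          omega
        have hvr : v ∈ pvReach n s0 r := (pvMem_reach_iff n s0 v hv r).mpr hle
        rw [hval v, pvCap, dif_pos hvr]
      · intro hv
        rw [hval v, pvCap, dif_neg (fun hc => hv ⟨r, hc⟩)]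
    · rw [if_neg heq]
      exact ih (r + 1) (pvRelaxRound n V verts dist) hval' hkeys' (by omega) v

-- Port B computes the BFS distance from nums1 to nums2 (or -1 when unreachable)
lemma pvB_char (nums1 nums2 : List Int) :
    (∀ (h : ∃ j, nums2 ∈ pvReach nums1.length nums1 j),
      minSplitMerge_alt nums1 nums2 = ((Nat.find h : Nat) : Int)) ∧
    ((¬ ∃ j, nums2 ∈ pvReach nums1.length nums1 j) → minSplitMerge_alt nums1 nums2 = -1) := by
  set n := nums1.length with hn
  set verts := pvArr nums1.length nums1 with hvertsdef
  set V : Int := (verts.length : Int) with hVdef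
  have hverts : ∀ v, v ∈ verts ↔ v.Perm nums1 := fun v => pvArr_mem nums1.length nums1 le_rfl v
  set dist0 := (verts.foldl (fun d v => d.insert v V) PySem.Dict.empty).insert nums1 0
    with hdist0
  have hval0 : ∀ v, dist0.getD v V = pvCap n nums1 V 0 v := by
    intro v
    rw [hdist0, PySem.Dict.getD_insert]
    by_cases hv : v = nums1
    · rw [if_pos hv]
      have hv0 : v ∈ pvReach n nums1 0 := by
        rw [pvReach, hv]
        exact Finset.mem_singleton_self _
      rw [pvCap, dif_pos hv0]
      have : Nat.find (⟨0, hv0⟩ : ∃ j, v ∈ pvReach n nums1 j) = 0 :=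
        Nat.find_eq_zero _ |>.mpr hv0
      rw [this]
      rfl
    · rw [if_neg hv]
      have h1 : ∀ w, (PySem.Dict.empty : PySem.Dict (List Int) Int).getD w V = V := by
        intro w; rw [PySem.Dict.getD_empty]
      rw [pvFold_insert_getD V verts PySem.Dict.empty h1 v]
      have hv0 : v ∉ pvReach n nums1 0 := by
        rw [pvReach]
        simpa using hv
      rw [pvCap, dif_neg hv0]
  have hkeys0 : ∀ u ∈ verts, dist0.contains u = true := by
    intro u hu
    rw [hdist0, PySem.Dict.contains_insert,
      pvFold_insert_contains V verts PySem.Dict.empty u (Or.inl hu)]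
    simp
  have hloop := pvBFLoop_spec n nums1 verts V hverts rfl (verts.length + 2) 0 dist0
    hval0 hkeys0 (by have := List.toFinset_card_le verts; omega) nums2
  have hs0P : nums1 ∈ verts.toFinset :=
    List.mem_toFinset.mpr ((hverts nums1).mpr (List.Perm.refl nums1))
  have hPc : ∀ x ∈ verts.toFinset, ∀ y ∈ pvNbrs n x, y ∈ verts.toFinset := by
    intro x hx y hy
    rw [List.mem_toFinset, hverts] at hx ⊢
    exact (pvNbrs_perm n x y hy).trans hx
  have halt : minSplitMerge_alt nums1 nums2
      = (if (pvBFLoop n V verts (verts.length + 2) dist0).getD nums2 V < V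
          then (pvBFLoop n V verts (verts.length + 2) dist0).getD nums2 V else -1) := rfl
  constructor
  · intro h
    have hlt : ((Nat.find h : Nat) : Int) < V := by
      have h1 := pvFind_card n nums1 verts.toFinset hs0P hPc nums2 h
      have h2 := List.toFinset_card_le verts
      rw [hVdef]
      omega
    rw [halt, hloop.1 h, if_pos hlt]
  · intro h
    rw [halt, hloop.2 h, if_neg (lt_irrefl V)]

-- ===== VERDICT =====
theorem minSplitMerge_spec : Claim_equal_minSplitMerge := by
  unfold Claim_equal_minSplitMerge Spec_minSplitMerge
  intro nums1 nums2 _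
  have hA := pvA_char nums1 nums2
  have hB := pvB_char nums1 nums2
  by_cases h : ∃ j, nums2 ∈ pvReach nums1.length nums1 j
  · rw [hA.1 h, hB.1 h]
  · rw [hA.2 h, hB.2 h]
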